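-- pv_equiv track=rewrite | github.com/RAIRLab/bloxorz | YY-tiny-board-bridge.py | has_full_yellow_line
-- ===== SOURCE A (Python) =====
-- def has_full_yellow_line(grid):
--     """Check if there's a full row or column of only yellow tiles.
--
--     Also considers a row/column invalid if all tiles are yellow except for II or GG.
--     """
--     rows, cols = len(grid), len(grid[0])
--
--     # Check rows
--     for r in range(rows):
--         non_yellow_tiles = [grid[r][c] for c in range(cols) if grid[r][c] not in ("YY", "II", "GG")]
--         if len(non_yellow_tiles) == 0:  # All tiles are either YY, II, or GG
--             return True
--
--     # Check columns
--     for c in range(cols):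
--         non_yellow_tiles = [grid[r][c] for r in range(rows) if grid[r][c] not in ("YY", "II", "GG")]
--         if len(non_yellow_tiles) == 0:  # All tiles are either YY, II, or GG
--             return True
--
--     return False
-- ===== SOURCE B (Python) =====
-- def has_full_yellow_line(grid):
--     """Check if there's a full row or column of only yellow tiles.
--
--     Single pass: maintain per-row and per-column "all yellow-ish" flags.
--     """
--     cols = len(grid[0])
--     col_ok = [True] * cols
--     row_ok = []
--     for row in grid:
--         ok = True
--         for c in range(cols):
--             if row[c] not in ("YY", "II", "GG"):
--                 ok = False
--                 col_ok[c] = False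
--         row_ok.append(ok)
--     return any(row_ok) or any(col_ok)
-- ===== Notes on version B (the rewrite author's own statement) =====
-- stated objective: faster
-- what changed: A makes two separate index-based scan passes (rows then columns), each building an intermediate list of non-yellow tiles; B makes one pass over the grid maintaining per-column boolean flags and a per-row flag list, then returns any(row_ok) or any(col_ok).
-- outside the precondition, e.g. on has_full_yellow_line([['YY', 'YY'], ['YY']]): A returns True, B raises IndexError
import Mathlib
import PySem

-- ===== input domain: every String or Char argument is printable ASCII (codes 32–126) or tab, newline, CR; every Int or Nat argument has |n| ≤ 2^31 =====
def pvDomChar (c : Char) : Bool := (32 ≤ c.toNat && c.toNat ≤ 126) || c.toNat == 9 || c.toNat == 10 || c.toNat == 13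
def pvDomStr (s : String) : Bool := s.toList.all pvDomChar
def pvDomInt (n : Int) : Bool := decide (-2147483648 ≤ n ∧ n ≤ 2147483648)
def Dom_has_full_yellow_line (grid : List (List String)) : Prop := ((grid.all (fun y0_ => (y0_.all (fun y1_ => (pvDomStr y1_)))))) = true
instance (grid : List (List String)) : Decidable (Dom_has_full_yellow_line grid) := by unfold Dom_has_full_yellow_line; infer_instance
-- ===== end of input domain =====

-- B replaces A's two separate index-scan passes (each building an intermediate list) by a
-- single pass over the grid maintaining per-row and per-column "all yellow-ish" boolean flags
-- (constant-factor speedup measured).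

-- tile in ("YY", "II", "GG")
def pvIsY (s : String) : Bool := s == "YY" || s == "II" || s == "GG"

-- ===== PORT A =====
def has_full_yellow_line (grid : List (List String)) : Bool :=
  let rows : Int := (grid.length : Int)
  let cols : Int := ((PySem.List.pyGetD grid 0 ([] : List String)).length : Int)
  -- for r in range(rows): if len([grid[r][c] for c in range(cols) if grid[r][c] not in (...)]) == 0: return True
  ((PySem.List.pyRange 0 rows).any (fun r =>
      ((PySem.List.pyRange 0 cols).filter (fun c =>
        !pvIsY (PySem.List.pyGetD (PySem.List.pyGetD grid r []) c ""))).length == 0))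
  -- for c in range(cols): if len([grid[r][c] for r in range(rows) if grid[r][c] not in (...)]) == 0: return True
  || ((PySem.List.pyRange 0 cols).any (fun c =>
      ((PySem.List.pyRange 0 rows).filter (fun r =>
        !pvIsY (PySem.List.pyGetD (PySem.List.pyGetD grid r []) c ""))).length == 0))

-- ===== PORT B =====
-- inner loop body: for c in range(cols): if row[c] not in (...): ok = False; col_ok[c] = False
def pvInnerF (row : List String) (p : List Bool × Bool) (c : Int) : List Bool × Bool :=
  if !pvIsY (PySem.List.pyGetD row c "") then (PySem.List.pySetD p.1 c false, false) else p

-- outer loop body: per row, run the inner loop with ok = True, then row_ok.append(ok)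
def pvOuterF (cols : Int) (st : List Bool × List Bool) (row : List String) : List Bool × List Bool :=
  let inner := (PySem.List.pyRange 0 cols).foldl (pvInnerF row) (st.1, true)
  (inner.1, st.2 ++ [inner.2])

def has_full_yellow_line_alt (grid : List (List String)) : Bool :=
  let cols : Int := ((PySem.List.pyGetD grid 0 ([] : List String)).length : Int)
  let st := grid.foldl (pvOuterF cols) (List.replicate cols.toNat true, ([] : List Bool))
  st.2.any id || st.1.any id

-- ===== PRECONDITION & SPEC =====
-- Pre_ excludes the empty grid (both programs raise IndexError on grid[0]) and grids
-- containing a row shorter than the first row: there Python A raises IndexError unless an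
-- earlier all-yellow row makes it return True first, while B's single full pass raises.
def Pre_has_full_yellow_line (grid : List (List String)) : Prop :=
  grid ≠ [] ∧ ∀ row ∈ grid, (grid.headD []).length ≤ row.length
instance (grid : List (List String)) : Decidable (Pre_has_full_yellow_line grid) := by
  unfold Pre_has_full_yellow_line; infer_instance

def pvWitness_has_full_yellow_line : List (List String) := [["YY", "XX"], ["GG", "II"]]

def Spec_has_full_yellow_line (grid : List (List String)) (out : Bool) : Prop := out = has_full_yellow_line_alt grid
instance (grid : List (List String)) (out : Bool) : Decidable (Spec_has_full_yellow_line grid out) := by unfold Spec_has_full_yellow_line; infer_instance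

-- ===== CLAIM (what is proved, stated in full; the proofs are below) =====
def Claim_equal_has_full_yellow_line : Prop := ∀ (grid : List (List String)), Dom_has_full_yellow_line grid → Pre_has_full_yellow_line grid → Spec_has_full_yellow_line grid (has_full_yellow_line grid)

-- ===== LEMMAS AND PROOFS =====

-- "len([x for x in l if not p(x)]) == 0" is "all x in l satisfy p"
theorem pv_filt_len {α : Type} (l : List α) (p : α → Bool) :
    (((l.filter (fun x => !p x)).length : Nat) == 0) = l.all p := by
  induction l with
  | nil => simp
  | cons x xs ih => by_cases h : p x <;> simp [h, ← ih]

-- the inner fold's ok-flag is "row is all yellow-ish on these columns"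
theorem pv_inner_snd (row : List String) (l : List Int) (p : List Bool × Bool) :
    (l.foldl (pvInnerF row) p).2
      = (p.2 && l.all (fun c => pvIsY (PySem.List.pyGetD row c ""))) := by
  induction l generalizing p with
  | nil => simp
  | cons c cs ih =>
    by_cases h : pvIsY (PySem.List.pyGetD row c "") <;>
      simp [List.foldl_cons, pvInnerF, h, ih]

-- the inner fold's col_ok entries: old entry && "row yellow-ish at that column (or c ≠ j)"
theorem pv_inner_fst (row : List String) (l : List Int) (hl : ∀ c ∈ l, 0 ≤ c)
    (p : List Bool × Bool) (j : Nat) :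
    ((l.foldl (pvInnerF row) p).1)[j]?
      = p.1[j]?.map (fun x =>
          x && l.all (fun c => (c != (j : Int)) || pvIsY (PySem.List.pyGetD row c ""))) := by
  induction l generalizing p with
  | nil =>
    cases hp : p.1[j]? <;> simp [hp]
  | cons c cs ih =>
    have hc : 0 ≤ c := hl c (by simp)
    have hcs : ∀ c' ∈ cs, 0 ≤ c' := fun c' h' => hl c' (by simp [h'])
    by_cases h : pvIsY (PySem.List.pyGetD row c "")
    · have hstep : pvInnerF row p c = p := by simp [pvInnerF, h]
      rw [List.foldl_cons, hstep, ih hcs]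
      cases hp : p.1[j]?
      · simp
      · simp [h]
    · have hstep : pvInnerF row p c = (p.1.set c.toNat false, false) := by
        simp [pvInnerF, h, PySem.List.pySetD_of_nonneg _ _ hc]
      rw [List.foldl_cons, hstep, ih hcs]
      have hb : pvIsY (PySem.List.pyGetD row c "") = false := by
        cases hx : pvIsY (PySem.List.pyGetD row c "") <;> simp_all
      by_cases hj : c.toNat = j
      · have hcj : (c != (j : Int)) = false := by
          have : c = (j : Int) := by omega
          simp [this]
        rw [List.getElem?_set, if_pos hj, hj]
        by_cases hlen : j < p.1.length
        · rw [if_pos hlen, List.getElem?_eq_getElem hlen]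
          simp only [Option.map_some, List.all_cons, hcj, hb, Bool.false_or,
            Bool.false_and, Bool.and_false]
        · rw [if_neg hlen, List.getElem?_eq_none (by omega)]
          rfl
      · have hcj : (c != (j : Int)) = true := by
          have : c ≠ (j : Int) := by omega
          simp [this]
        rw [List.getElem?_set, if_neg hj]
        cases hp : p.1[j]? <;>
          simp [List.all_cons, hcj, hb]

-- row_ok after the outer fold: one flag per row, "row all yellow-ish on columns 0..cols"
theorem pv_outer_snd (cols : Int) (grid : List (List String)) (st : List Bool × List Bool) :
    (grid.foldl (pvOuterF cols) st).2
      = st.2 ++ grid.map (fun row =>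
          (PySem.List.pyRange 0 cols).all (fun c => pvIsY (PySem.List.pyGetD row c ""))) := by
  induction grid generalizing st with
  | nil => simp
  | cons row rest ih =>
    rw [List.foldl_cons]
    show (rest.foldl (pvOuterF cols) (pvOuterF cols st row)).2 = _
    rw [ih]
    simp [pvOuterF, pv_inner_snd]

-- col_ok after the outer fold, entrywise
theorem pv_outer_fst (cols : Int) (grid : List (List String)) (st : List Bool × List Bool)
    (j : Nat) :
    ((grid.foldl (pvOuterF cols) st).1)[j]?
      = st.1[j]?.map (fun x =>
          x && grid.all (fun row =>
            (PySem.List.pyRange 0 cols).all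
              (fun c => (c != (j : Int)) || pvIsY (PySem.List.pyGetD row c "")))) := by
  induction grid generalizing st with
  | nil => cases hp : st.1[j]? <;> simp [hp]
  | cons row rest ih =>
    rw [List.foldl_cons]
    show (rest.foldl (pvOuterF cols) (pvOuterF cols st row)).1[j]? = _
    rw [ih]
    have hnn : ∀ c ∈ PySem.List.pyRange 0 cols, (0:Int) ≤ c := by
      intro c hc; exact (PySem.List.mem_pyRange_one.mp hc).1
    show (((PySem.List.pyRange 0 cols).foldl (pvInnerF row) (st.1, true)).1)[j]?.map _ = _
    rw [pv_inner_fst row _ hnn (st.1, true) j]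
    cases hp : st.1[j]? <;> simp [Bool.and_assoc]

-- collapsing "for all c in range(n), c = j → row yellow-ish at c" to "row yellow-ish at j"
theorem pv_collapse (row : List String) (n : Int) (j : Nat) (h : (j : Int) < n) :
    ((PySem.List.pyRange 0 n).all
        (fun c => (c != (j : Int)) || pvIsY (PySem.List.pyGetD row c "")))
      = pvIsY (PySem.List.pyGetD row (j : Int) "") := by
  have hj : (j : Int) ∈ PySem.List.pyRange 0 n := PySem.List.mem_pyRange_one.mpr ⟨by omega, h⟩
  cases hP : pvIsY (PySem.List.pyGetD row (j : Int) "")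
  · refine List.all_eq_false.mpr ⟨(j : Int), hj, ?_⟩
    simp only [bne_self_eq_false, Bool.false_or, hP]
    exact Bool.false_ne_true
  · refine List.all_eq_true.mpr ?_
    intro c hc
    by_cases hcj : c = (j : Int)
    · rw [hcj]
      simp only [bne_self_eq_false, Bool.false_or]
      exact hP
    · have : (c != (j : Int)) = true := by simp [hcj]
      rw [this, Bool.true_or]

-- any over "for r in range(len(xs)): f(xs[r])" is any over xs
theorem pv_any_idx {α : Type} (xs : List α) (d : α) (f : α → Bool) :
    (PySem.List.pyRange 0 (xs.length : Int)).any (fun r => f (PySem.List.pyGetD xs r d))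
      = xs.any f := by
  conv_rhs => rw [← PySem.List.map_pyGetD_pyRange_zero' xs d]
  rw [List.any_map]
  rfl

-- all over "for r in range(len(xs)): f(xs[r])" is all over xs
theorem pv_all_idx {α : Type} (xs : List α) (d : α) (f : α → Bool) :
    (PySem.List.pyRange 0 (xs.length : Int)).all (fun r => f (PySem.List.pyGetD xs r d))
      = xs.all f := by
  conv_rhs => rw [← PySem.List.map_pyGetD_pyRange_zero' xs d]
  rw [List.all_map]
  rfl

-- the final col_ok list, in closed form
theorem pv_ck_final (grid : List (List String)) (n : Nat) :
    (grid.foldl (pvOuterF (n : Int)) (List.replicate n true, ([] : List Bool))).1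
      = (List.range n).map (fun (j : Nat) =>
          grid.all (fun row => pvIsY (PySem.List.pyGetD row (j : Int) ""))) := by
  apply List.ext_getElem?
  intro j
  rw [pv_outer_fst]
  by_cases hj : j < n
  · have h1 : (List.replicate n (true : Bool))[j]? = some true := by
      simp [hj]
    have h2 : ((List.range n).map (fun (j : Nat) =>
        grid.all (fun row => pvIsY (PySem.List.pyGetD row (j : Int) ""))))[j]?
        = some (grid.all (fun row => pvIsY (PySem.List.pyGetD row (j : Int) ""))) := by
      rw [List.getElem?_map, List.getElem?_range hj]
      rfl
    rw [h1, h2]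
    have hcast : (j : Int) < (n : Int) := by exact_mod_cast hj
    simp only [Option.map_some, Bool.true_and]
    congr 1
    have hrow : ∀ row : List String,
        ((PySem.List.pyRange 0 (n : Int)).all
          (fun c => (c != (j : Int)) || pvIsY (PySem.List.pyGetD row c "")))
        = pvIsY (PySem.List.pyGetD row (j : Int) "") := fun row => pv_collapse row _ j hcast
    simp only [hrow]
  · have h1 : (List.replicate n (true : Bool))[j]? = none := by
      simp [hj]
    have h2 : ((List.range n).map (fun (j : Nat) =>
        grid.all (fun row => pvIsY (PySem.List.pyGetD row (j : Int) ""))))[j]? = none := by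
      rw [List.getElem?_map, List.getElem?_eq_none (by simpa using le_of_not_gt hj)]
      rfl
    rw [h1, h2]
    rfl

-- the two ports agree on every input
theorem pv_ports_eq (grid : List (List String)) :
    has_full_yellow_line grid = has_full_yellow_line_alt grid := by
  unfold has_full_yellow_line has_full_yellow_line_alt
  set n : Nat := (PySem.List.pyGetD grid 0 ([] : List String)).length with hn
  simp only [pv_filt_len]
  -- B's row_ok part
  rw [pv_outer_snd]
  simp only [List.nil_append, Int.toNat_natCast]
  rw [pv_ck_final grid n]
  rw [List.any_map, List.any_map]
  congr 1
  -- row part: A's any over row indices = B's any over row_ok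
  · rw [Function.id_comp]
    exact pv_any_idx grid ([] : List String)
      (fun row => (PySem.List.pyRange 0 (n : Int)).all
        (fun c => pvIsY (PySem.List.pyGetD row c "")))
  -- column part
  · have hcol : ∀ c : Int,
        ((PySem.List.pyRange 0 (grid.length : Int)).all
          (fun r => pvIsY (PySem.List.pyGetD (PySem.List.pyGetD grid r []) c "")))
        = grid.all (fun row => pvIsY (PySem.List.pyGetD row c "")) := fun c =>
      pv_all_idx grid ([] : List String) (fun row => pvIsY (PySem.List.pyGetD row c ""))
    simp only [hcol]
    rw [PySem.List.pyRange_zero_nat n, List.any_map]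
    rfl

-- ===== VERDICT (by name: the statement is the Claim_ definition above) =====
theorem has_full_yellow_line_spec : Claim_equal_has_full_yellow_line := by
  intro grid _ _
  unfold Spec_has_full_yellow_line
  exact pv_ports_eq grid
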